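-- pv_equiv track=rewrite | github.com/MarcelTuraj/prg-basics | 04-Functions/7.18.py | function
-- ===== SOURCE A (Python) =====
-- def function(number) :
--     string = str(number)
--
--     summ = 0
--     for i in range(1,10):
--         counter = string.count(f"{i}")
--         if counter > 1 :
--             summ += counter*i
--     return summ
-- ===== SOURCE B (Python) =====
-- def function(number):
--     digits = sorted(c for c in str(number) if c.isdigit())
--     def scan(ds):
--         if not ds:
--             return 0
--         d = ds[0]
--         k = 1
--         while k < len(ds) and ds[k] == d:
--             k += 1
--         return (k * int(d) if k > 1 else 0) + scan(ds[k:])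
--     return scan(digits)
-- ===== Notes on version B (the rewrite author's own statement) =====
-- stated objective: alternative
-- what changed: Sorts the digit characters of str(number) and sums run_length*digit over maximal runs of length at least two in a recursive run-length scan, instead of A's nine separate string.count scans.
import Mathlib
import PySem

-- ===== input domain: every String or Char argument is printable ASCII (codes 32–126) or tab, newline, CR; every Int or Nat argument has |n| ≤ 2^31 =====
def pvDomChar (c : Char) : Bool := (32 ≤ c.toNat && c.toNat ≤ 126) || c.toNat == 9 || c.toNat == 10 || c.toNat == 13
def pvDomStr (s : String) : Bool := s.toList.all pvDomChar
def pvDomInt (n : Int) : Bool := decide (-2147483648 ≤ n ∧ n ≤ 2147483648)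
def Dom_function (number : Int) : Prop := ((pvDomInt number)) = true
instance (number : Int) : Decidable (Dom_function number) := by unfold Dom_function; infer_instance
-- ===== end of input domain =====

-- B sorts the digit characters of str(number) and sums run_length*digit over maximal
-- runs of length at least two (recursive run-length scan), instead of A's nine count scans
-- (objective: alternative algorithm, same result).

-- ===== PORT A =====
def function (number : Int) : Int :=
  let string := PySem.Int.toStr number
  (PySem.List.pyRange 1 10 1).foldl (fun summ i =>
    let counter : Int := (PySem.Str.count string (PySem.Int.toStr i) : Int)
    if counter > 1 then summ + counter * i else summ) 0

-- ===== PORT B =====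
-- the inner while loop counts the leading run of chars equal to d: k = takeWhile length + 1,
-- and ds[k:] is then dropWhile; int(d) under the digit guard is exactly d.toNat - 48
def scanRuns : List Char → Int
  | [] => 0
  | d :: rest =>
    let k : Int := ((rest.takeWhile (fun c => c == d)).length : Int) + 1
    (if k > 1 then k * ((d.toNat : Int) - 48) else 0) +
      scanRuns (rest.dropWhile (fun c => c == d))
termination_by ds => ds.length
decreasing_by
  simp only [List.length_cons]
  exact Nat.lt_succ_of_le (List.length_dropWhile_le _ _)

def function_alt (number : Int) : Int :=
  let digits := PySem.List.sorted
    ((PySem.Int.toStr number).toList.filter PySem.Chars.isdigit) (fun c => c) false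
  scanRuns digits

-- ===== PRECONDITION & SPEC =====
def Spec_function (number : Int) (out : Int) : Prop := out = function_alt number
instance (number : Int) (out : Int) : Decidable (Spec_function number out) := by unfold Spec_function; infer_instance

-- ===== CLAIM (what is proved, stated in full; the proofs are below) =====
def Claim_equal_function : Prop := ∀ (number : Int), Dom_function number → Spec_function number (function number)

-- ===== LEMMAS AND PROOFS =====

-- PySem.Chars.count with a single-char needle is List.count
lemma count_go_singleton (c : Char) : ∀ (fuel : Nat) (l : List Char) (acc : Nat),
    l.length ≤ fuel → PySem.Chars.count.go [c] fuel l acc = acc + l.count c := by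
  intro fuel
  induction fuel with
  | zero =>
    intro l acc h
    have : l = [] := List.length_eq_zero_iff.mp (Nat.le_zero.mp h)
    subst this; simp [PySem.Chars.count.go]
  | succ n ih =>
    intro l acc h
    cases l with
    | nil => simp [PySem.Chars.count.go]
    | cons hd t =>
      rw [PySem.Chars.count.go]
      simp only [List.isPrefixOf, Bool.and_true, List.length_cons, List.length_nil] at *
      by_cases hc : c = hd
      · subst hc
        simp only [beq_self_eq_true, if_pos, List.drop_succ_cons, List.drop_zero, List.count_cons_self]
        rw [ih t (acc + 1) (by omega)]
        omega
      · rw [if_neg (by simp [hc]), ih t acc (by omega), List.count_cons_of_ne (Ne.symm hc)]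

lemma count_singleton (l : List Char) (c : Char) :
    PySem.Chars.count l [c] = l.count c := by
  rw [PySem.Chars.count]
  simp only [List.isEmpty_cons, if_neg, Bool.false_eq_true, not_false_iff]
  exact (count_go_singleton c l.length l 0 le_rfl).trans (Nat.zero_add _)

lemma foldl_ite_add {β : Type} (l : List β) (p : β → Prop) [DecidablePred p]
    (f : β → Int) (a : Int) :
    l.foldl (fun acc x => if p x then acc + f x else acc) a
      = a + (l.map (fun x => if p x then f x else 0)).sum := by
  induction l generalizing a with
  | nil => simp
  | cons h t ih =>
    simp only [List.foldl_cons, List.map_cons, List.sum_cons, ih]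
    by_cases hc : p h
    · simp [hc]; ring
    · simp [hc]

lemma char_mem_digits (k : Char) (h : PySem.Chars.isdigit k = true) :
    k ∈ ['0','1','2','3','4','5','6','7','8','9'] := by
  simp only [PySem.Chars.isdigit, Bool.and_eq_true, decide_eq_true_eq] at h
  have h1 : 48 ≤ k.toNat := h.1
  have h2 : k.toNat ≤ 57 := h.2
  have hk := Char.ofNat_toNat k
  have : k.toNat = 48 ∨ k.toNat = 49 ∨ k.toNat = 50 ∨ k.toNat = 51 ∨ k.toNat = 52 ∨
      k.toNat = 53 ∨ k.toNat = 54 ∨ k.toNat = 55 ∨ k.toNat = 56 ∨ k.toNat = 57 := by omega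
  rcases this with h|h|h|h|h|h|h|h|h|h <;> (rw [← hk, h]; decide)

-- run-length scan of a weakly increasing char list sums count*value over distinct chars
lemma scanRuns_sorted : ∀ (S : List Char), S.Pairwise (· ≤ ·) →
    scanRuns S = ∑ k ∈ S.toFinset,
      (if ((S.count k : Int)) > 1 then (S.count k : Int) * ((k.toNat : Int) - 48) else 0) := by
  intro S
  induction S using scanRuns.induct with
  | case1 => simp [scanRuns]
  | case2 d rest ih =>
    intro hp
    set t := rest.takeWhile (fun c => c == d) with ht
    set u := rest.dropWhile (fun c => c == d) with hu
    have hrest : t ++ u = rest := List.takeWhile_append_dropWhile ..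
    have htd : ∀ c ∈ t, c = d := by
      intro c hc
      have := List.mem_takeWhile_imp hc
      simpa using this
    have hdle : ∀ x ∈ rest, d ≤ x := (List.pairwise_cons.mp hp).1
    have hup : u.Pairwise (· ≤ ·) :=
      List.Pairwise.sublist (List.dropWhile_sublist _) (List.pairwise_cons.mp hp).2
    have hdu : d ∉ u := by
      intro hmem
      cases hcase : u with
      | nil => rw [hcase] at hmem; simp at hmem
      | cons h0 u' =>
        have hw : rest.dropWhile (fun c => c == d) ≠ [] := by
          rw [← hu, hcase]; simp
        have hne : ¬ ((h0 == d) = true) := by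
          have := List.head_dropWhile_not (fun c => c == d) hw
          rw [List.head_eq_iff_head?_eq_some hw |>.mpr (by rw [← hu, hcase]; rfl)] at this
          simp [this]
        have hne' : h0 ≠ d := by simpa using hne
        have hd_lt : d < h0 := lt_of_le_of_ne
          (hdle h0 (by rw [← hrest, hcase]; simp)) (Ne.symm hne')
        rw [hcase] at hmem
        rcases List.mem_cons.mp hmem with h | h
        · exact absurd h.symm hne'
        · have : h0 ≤ d := (List.pairwise_cons.mp (hcase ▸ hup)).1 d h
          exact absurd (lt_of_lt_of_le hd_lt this) (lt_irrefl d)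
    have hcount_d : (d :: rest).count d = t.length + 1 := by
      rw [← hrest, List.count_cons_self, List.count_append]
      have h1 : t.count d = t.length := by
        rw [List.count_eq_length]
        intro c hc; exact ((htd c hc) ▸ rfl)
      have h2 : u.count d = 0 := List.count_eq_zero.mpr hdu
      omega
    have hcount_ne : ∀ k, k ≠ d → (d :: rest).count k = u.count k := by
      intro k hk
      rw [← hrest, List.count_cons_of_ne (Ne.symm hk), List.count_append]
      have : t.count k = 0 := List.count_eq_zero.mpr (fun hm => hk (htd k hm))
      omega
    have hfin : (d :: rest).toFinset = insert d u.toFinset := by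
      ext x
      simp only [List.toFinset_cons, Finset.mem_insert, List.mem_toFinset, ← hrest,
        List.mem_append]
      constructor
      · rintro (h | h | h)
        · exact Or.inl h
        · exact Or.inl (htd x h)
        · exact Or.inr h
      · rintro (h | h)
        · exact Or.inl h
        · exact Or.inr (Or.inr h)
    rw [scanRuns, hfin, Finset.sum_insert (by simpa using hdu)]
    have hsum_u : ∑ k ∈ u.toFinset,
        (if ((d :: rest).count k : Int) > 1 then ((d :: rest).count k : Int) * ((k.toNat : Int) - 48) else 0)
        = ∑ k ∈ u.toFinset,
        (if ((u.count k : Int)) > 1 then (u.count k : Int) * ((k.toNat : Int) - 48) else 0) := by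
      apply Finset.sum_congr rfl
      intro k hk
      have hk' : k ≠ d := fun h => hdu (h ▸ List.mem_toFinset.mp hk)
      rw [hcount_ne k hk']
    rw [hsum_u, ← ih hup, hcount_d]
    simp only [← ht, ← hu]
    congr 1

-- ===== VERDICT (by name: the statement is the Claim_ definition above) =====
theorem function_spec : Claim_equal_function := by
  intro number _
  unfold Spec_function
  set L := (PySem.Int.toStr number).toList with hL
  set F := L.filter PySem.Chars.isdigit with hF
  set D := PySem.List.sorted F (fun c => c) false with hD
  have hperm : D.Perm F := PySem.List.sorted_perm ..
  have hDp : D.Pairwise (· ≤ ·) := PySem.List.sorted_pairwise ..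
  have hDcount : ∀ k, D.count k = F.count k := fun k => hperm.count_eq k
  have hDfin : D.toFinset = F.toFinset := List.toFinset_eq_of_perm _ _ hperm
  set g0 : Char → Int := fun k =>
    if ((L.count k : Int)) > 1 then (L.count k : Int) * ((k.toNat : Int) - 48) else 0 with hg0
  have hB : function_alt number = ∑ k ∈ F.toFinset, g0 k := by
    show scanRuns D = _
    rw [scanRuns_sorted D hDp, hDfin]
    apply Finset.sum_congr rfl
    intro k hk
    have hkF : k ∈ F := List.mem_toFinset.mp hk
    have hkd : PySem.Chars.isdigit k = true := List.of_mem_filter hkF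
    rw [hDcount k, hF, List.count_filter hkd]
  have hBD : ∑ k ∈ F.toFinset, g0 k
      = ((['0','1','2','3','4','5','6','7','8','9'] : List Char).map g0).sum := by
    rw [← List.sum_toFinset g0 (by decide)]
    apply Finset.sum_subset
    · intro k hk
      exact List.mem_toFinset.mpr (char_mem_digits k (List.of_mem_filter (List.mem_toFinset.mp hk)))
    · intro k hk hk2
      have hkF : k ∉ F := fun h => hk2 (List.mem_toFinset.mpr h)
      have hkl : k ∈ ['0','1','2','3','4','5','6','7','8','9'] := List.mem_toFinset.mp hk
      have hdig : PySem.Chars.isdigit k = true := by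
        simp only [List.mem_cons, List.not_mem_nil, or_false] at hkl
        rcases hkl with h|h|h|h|h|h|h|h|h|h <;> (subst h; decide)
      have hz : L.count k = 0 := by
        have := List.count_eq_zero.mpr hkF
        rwa [hF, List.count_filter hdig] at this
      simp [hg0, hz]
  rw [hB, hBD]
  -- A side
  unfold function
  rw [show PySem.List.pyRange 1 10 1 = [1,2,3,4,5,6,7,8,9] from by decide]
  rw [foldl_ite_add _ (fun i => ((PySem.Str.count (PySem.Int.toStr number) (PySem.Int.toStr i) : Int)) > 1)
    (fun i => (PySem.Str.count (PySem.Int.toStr number) (PySem.Int.toStr i) : Int) * i) 0]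
  simp only [PySem.Str.count_eq, ← hL]
  simp only [List.map_cons, List.map_nil, List.sum_cons, List.sum_nil, hg0]
  rw [show (PySem.Int.toStr 1).toList = ['1'] from by decide,
    show (PySem.Int.toStr 2).toList = ['2'] from by decide,
    show (PySem.Int.toStr 3).toList = ['3'] from by decide,
    show (PySem.Int.toStr 4).toList = ['4'] from by decide,
    show (PySem.Int.toStr 5).toList = ['5'] from by decide,
    show (PySem.Int.toStr 6).toList = ['6'] from by decide,
    show (PySem.Int.toStr 7).toList = ['7'] from by decide,
    show (PySem.Int.toStr 8).toList = ['8'] from by decide,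
    show (PySem.Int.toStr 9).toList = ['9'] from by decide]
  simp only [count_singleton]
  simp only [show (('0'.toNat : Int) - 48) = 0 from by decide,
    show (('1'.toNat : Int) - 48) = 1 from by decide,
    show (('2'.toNat : Int) - 48) = 2 from by decide,
    show (('3'.toNat : Int) - 48) = 3 from by decide,
    show (('4'.toNat : Int) - 48) = 4 from by decide,
    show (('5'.toNat : Int) - 48) = 5 from by decide,
    show (('6'.toNat : Int) - 48) = 6 from by decide,
    show (('7'.toNat : Int) - 48) = 7 from by decide,
    show (('8'.toNat : Int) - 48) = 8 from by decide,
    show (('9'.toNat : Int) - 48) = 9 from by decide,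
    mul_zero, ite_self, zero_add]
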